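-- pv_equiv track=rewrite | github.com/balhaddad-sys/shifu-ocr | shifu_ocr/mind/trunk.py | _find_coherent_cluster
-- ===== SOURCE A (Python) =====
-- from typing import Dict, List, Set, Optional, Tuple, Any
--
-- def _find_coherent_cluster(words: List[str],
--                            co_graph: Dict[str, Dict[str, float]]) -> Set[str]:
--     """
--     Find the largest subset of words that are mutually connected
--     in the co-occurrence graph.
--     """
--     if len(words) < 2:
--         return set()
--     # Score each word by how many other words in the list it co-occurs with
--     scores: Dict[str, int] = {}
--     for w in words:
--         neighbors = co_graph.get(w, {})
--         count = sum(1 for other in words if other != w and other in neighbors)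
--         scores[w] = count
--     # Keep words with at least 1 connection to other list members
--     coherent = {w for w, s in scores.items() if s >= 1}
--     return coherent
-- ===== SOURCE B (Python) =====
-- def _find_coherent_cluster(words, co_graph):
--     """
--     Find the words with at least one co-occurrence link to another list member.
--     Single pass over distinct words; for each word, scan its (usually short)
--     neighbor list with early exit, instead of rescanning the whole word list.
--     """
--     if len(words) < 2:
--         return set()
--     word_set = set(words)
--     return {w for w in word_set
--             if any(k in word_set and k != w for k in co_graph.get(w, {}))}
-- ===== Notes on version B (the rewrite author's own statement) =====
-- stated objective: faster
-- what changed: Instead of scoring every word by a full inner scan over the word list against its neighbor dict, B builds the word set once and for each distinct word checks its neighbor keys directly with an early-exit any(); no score dict is built.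
import Mathlib
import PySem

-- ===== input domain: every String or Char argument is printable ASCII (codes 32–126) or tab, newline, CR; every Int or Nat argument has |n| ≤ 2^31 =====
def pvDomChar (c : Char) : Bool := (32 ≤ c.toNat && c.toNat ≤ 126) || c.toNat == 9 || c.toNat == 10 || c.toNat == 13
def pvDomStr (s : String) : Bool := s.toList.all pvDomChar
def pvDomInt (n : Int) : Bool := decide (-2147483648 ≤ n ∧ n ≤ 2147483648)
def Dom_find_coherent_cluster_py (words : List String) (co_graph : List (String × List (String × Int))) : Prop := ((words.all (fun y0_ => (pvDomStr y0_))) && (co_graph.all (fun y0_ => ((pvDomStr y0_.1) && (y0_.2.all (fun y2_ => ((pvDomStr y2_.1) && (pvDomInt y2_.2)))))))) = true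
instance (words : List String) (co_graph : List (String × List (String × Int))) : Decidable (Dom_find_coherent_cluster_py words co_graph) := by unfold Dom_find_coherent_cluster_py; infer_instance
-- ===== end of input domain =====

-- B replaces A's quadratic per-word rescans of the word list by one word set
-- plus an early-exit scan of each distinct word's neighbor keys.

-- ===== PORT A =====
def find_coherent_cluster_py (words : List String) (co_graph : List (String × List (String × Int))) : List String :=
  if words.length < 2 then [] else
    let scores : PySem.Dict String Int :=
      words.foldl (fun d w =>
        let neighbors : PySem.Dict String Int := PySem.Dict.mk ((PySem.Dict.mk co_graph).getD w [])
        let count : Int := words.foldl (fun acc other =>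
          if other ≠ w ∧ neighbors.contains other = true then acc + 1 else acc) 0
        d.insert w count) (PySem.Dict.mk [])
    PySem.Set.ofList ((scores.items.filter (fun p => decide (1 ≤ p.2))).map (fun p => p.1))

-- ===== PORT B =====
def find_coherent_cluster_py_alt (words : List String) (co_graph : List (String × List (String × Int))) : List String :=
  if words.length < 2 then [] else
    let wset : PySem.Set String := PySem.Set.ofList words
    wset.filter (fun w =>
      ((PySem.Dict.mk co_graph).getD w []).any
        (fun p => PySem.Set.contains wset p.1 && p.1 != w))

-- ===== PRECONDITION & SPEC =====
def Spec_find_coherent_cluster_py (words : List String) (co_graph : List (String × List (String × Int))) (out : List String) : Prop := out = find_coherent_cluster_py_alt words co_graph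
instance (words : List String) (co_graph : List (String × List (String × Int))) (out : List String) : Decidable (Spec_find_coherent_cluster_py words co_graph out) := by unfold Spec_find_coherent_cluster_py; infer_instance

-- ===== CLAIM (what is proved, stated in full; the proofs are below) =====
def Claim_equal_find_coherent_cluster_py : Prop := ∀ (words : List String) (co_graph : List (String × List (String × Int))), Dom_find_coherent_cluster_py words co_graph → Spec_find_coherent_cluster_py words co_graph (find_coherent_cluster_py words co_graph)


-- ===== LEMMAS AND PROOFS =====

-- abbreviation (proof side only) for A's inner score loop
def pvCnt (words : List String) (co_graph : List (String × List (String × Int))) (w : String) : Int :=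
  List.foldl (fun acc other =>
    if other ≠ w ∧ (PySem.Dict.mk ((PySem.Dict.mk co_graph).getD w [])).contains other = true
    then acc + 1 else acc) 0 words

-- A's score loop inserts, for each word, a value that depends on the key only:
-- the resulting dict's items are the distinct words paired with their scores.
theorem items_foldl_insert_keyfun (f : String → Int) :
    ∀ (l s : List String), s.Nodup →
      (l.foldl (fun d w => d.insert w (f w))
        (PySem.Dict.mk (s.map (fun w => (w, f w))))).items
      = (PySem.Set.update s l).map (fun w => (w, f w)) := by
  intro l
  induction l with
  | nil => intro s _; simp [PySem.Set.update]
  | cons w l ih =>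
    intro s hs
    have hc : (PySem.Dict.mk (s.map (fun w => (w, f w)))).contains w = decide (w ∈ s) := by
      rw [PySem.Dict.contains_mk, Bool.eq_iff_iff]
      simp only [List.any_eq_true, List.mem_map, decide_eq_true_eq, beq_iff_eq]
      constructor
      · rintro ⟨p, ⟨x, hx, rfl⟩, rfl⟩; exact hx
      · intro h; exact ⟨(w, f w), ⟨w, h, rfl⟩, rfl⟩
    by_cases hw : w ∈ s
    · have heq : (PySem.Dict.mk (s.map (fun w => (w, f w)))).insert w (f w)
          = PySem.Dict.mk (s.map (fun w => (w, f w))) := by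
        apply PySem.Dict.ext
        rw [PySem.Dict.items_insert_of_contains _ _ (by simp [hc, hw])]
        show List.map _ (s.map (fun w => (w, f w))) = _
        rw [List.map_map]
        apply List.map_congr_left
        intro x _
        by_cases hxw : x = w <;> simp [hxw]
      simp only [List.foldl_cons, heq, PySem.Set.update_cons, PySem.Set.add_of_mem hw]
      exact ih s hs
    · have heq : ((PySem.Dict.mk (s.map (fun w => (w, f w)))).insert w (f w)).items
          = (s ++ [w]).map (fun w => (w, f w)) := by
        rw [PySem.Dict.items_insert_of_not_contains _ _ (by simp [hc, hw])]
        simp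
      simp only [List.foldl_cons, PySem.Set.update_cons, PySem.Set.add_of_not_mem hw]
      have : (PySem.Dict.mk (s.map (fun w => (w, f w)))).insert w (f w)
          = PySem.Dict.mk ((s ++ [w]).map (fun w => (w, f w))) := PySem.Dict.ext heq
      rw [this]
      refine ih (s ++ [w]) ?_
      simp only [List.nodup_append, List.nodup_cons, List.nodup_nil, and_true]
      refine ⟨hs, by simp, ?_⟩
      intro a ha b hb
      simp only [List.mem_singleton] at hb
      subst hb
      exact fun h => hw (h ▸ ha)

-- the per-word predicates of A and B agree
theorem pred_agree (words : List String) (co_graph : List (String × List (String × Int))) (w : String) :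
    decide (1 ≤ pvCnt words co_graph w)
    = ((PySem.Dict.mk co_graph).getD w []).any
        (fun p => PySem.Set.contains (PySem.Set.ofList words) p.1 && p.1 != w) := by
  unfold pvCnt
  rw [PySem.List.foldl_ite_add_one
    (fun other => other ≠ w ∧ (PySem.Dict.mk ((PySem.Dict.mk co_graph).getD w [])).contains other = true)
    words 0]
  rw [Bool.eq_iff_iff]
  simp only [decide_eq_true_eq, List.any_eq_true, Bool.and_eq_true, bne_iff_ne,
    PySem.Set.contains_iff, PySem.Set.mem_ofList, zero_add]
  constructor
  · intro h
    have hpos : 0 < List.countP (fun x => decide (x ≠ w ∧ (PySem.Dict.mk ((PySem.Dict.mk co_graph).getD w [])).contains x = true)) words := by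
      omega
    obtain ⟨x, hx, hpx⟩ := List.countP_pos_iff.mp hpos
    simp only [decide_eq_true_eq] at hpx
    obtain ⟨hne, hcont⟩ := hpx
    rw [PySem.Dict.contains_mk] at hcont
    obtain ⟨p, hp, he⟩ := List.any_eq_true.mp hcont
    exact ⟨p, hp, by rw [eq_of_beq he]; exact ⟨hx, hne⟩⟩
  · rintro ⟨p, hp, hmem, hne⟩
    have hpos : 0 < List.countP (fun x => decide (x ≠ w ∧ (PySem.Dict.mk ((PySem.Dict.mk co_graph).getD w [])).contains x = true)) words := by
      apply List.countP_pos_iff.mpr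
      refine ⟨p.1, hmem, ?_⟩
      simp only [decide_eq_true_eq]
      refine ⟨hne, ?_⟩
      rw [PySem.Dict.contains_mk]
      exact List.any_eq_true.mpr ⟨p, hp, by simp⟩
    omega

theorem ports_eq (words : List String) (co_graph : List (String × List (String × Int))) :
    find_coherent_cluster_py words co_graph = find_coherent_cluster_py_alt words co_graph := by
  show (if words.length < 2 then [] else
      PySem.Set.ofList
        ((((words.foldl (fun d w => d.insert w (pvCnt words co_graph w))
            (PySem.Dict.mk [])).items.filter (fun p => decide (1 ≤ p.2))).map (fun p => p.1))))
    = find_coherent_cluster_py_alt words co_graph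
  unfold find_coherent_cluster_py_alt
  by_cases hlen : words.length < 2
  · simp [hlen]
  · simp only [hlen, if_false]
    have hitems := items_foldl_insert_keyfun (pvCnt words co_graph) words [] List.nodup_nil
    simp only [List.map_nil] at hitems
    rw [hitems, PySem.Set.update_nil_left, List.filter_map, List.map_map]
    rw [show ((fun (p : String × Int) => p.1) ∘ (fun w => (w, pvCnt words co_graph w))) = id
        from funext fun x => rfl, List.map_id]
    rw [PySem.Set.ofList_eq_self_of_nodup _ ((PySem.Set.nodup_ofList words).filter _)]
    apply List.filter_congr
    intro w _
    show decide (1 ≤ pvCnt words co_graph w) = _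
    exact pred_agree words co_graph w

-- ===== VERDICT (by name: the statement is the Claim_ definition above) =====
theorem find_coherent_cluster_py_spec : Claim_equal_find_coherent_cluster_py := by
  intro words co_graph _
  exact ports_eq words co_graph
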